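-- pv_equiv track=rewrite | github.com/dionisos2/AdventOfCode | day14.py | day14
-- ===== SOURCE A (Python) =====
-- def day14(platform):
-- 	blocked = [0 for _ in platform[0]]
-- 	lrow = len(platform)
--
-- 	result = 0
-- 	for column, value in enumerate(blocked):
-- 		for row, line in enumerate(platform):
-- 			block = platform[row][column]
-- 			if block == "#":
-- 				blocked[column] = row + 1
-- 			if block == "O":
-- 				result += (lrow) - blocked[column]
-- 				blocked[column] += 1
--
-- 	return result
-- ===== SOURCE B (Python) =====
-- def _seg(lrow, start, count):
--     # total north load of a packed run of `count` rocks starting at row `start`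
--     return count * lrow - (count * start + count * (count - 1) // 2)
--
-- def day14(platform):
--     lrow = len(platform)
--     width = len(platform[0])
--     result = 0
--     for c in range(width):
--         start = 0
--         count = 0
--         for r, line in enumerate(platform):
--             cell = line[c]
--             if cell == "#":
--                 result += _seg(lrow, start, count)
--                 start = r + 1
--                 count = 0
--             elif cell == "O":
--                 count += 1
--         result += _seg(lrow, start, count)
--     return result
-- ===== Notes on version B (the rewrite author's own statement) =====
-- stated objective: alternative
-- what changed: B replaces A's per-rock simulation (a mutable per-column free-slot pointer incremented rock by rock) with a per-segment closed form: each maximal run between '#' walls contributes n*lrow - (n*start + n*(n-1)//2) via the arithmetic-series formula.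
import Mathlib
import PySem

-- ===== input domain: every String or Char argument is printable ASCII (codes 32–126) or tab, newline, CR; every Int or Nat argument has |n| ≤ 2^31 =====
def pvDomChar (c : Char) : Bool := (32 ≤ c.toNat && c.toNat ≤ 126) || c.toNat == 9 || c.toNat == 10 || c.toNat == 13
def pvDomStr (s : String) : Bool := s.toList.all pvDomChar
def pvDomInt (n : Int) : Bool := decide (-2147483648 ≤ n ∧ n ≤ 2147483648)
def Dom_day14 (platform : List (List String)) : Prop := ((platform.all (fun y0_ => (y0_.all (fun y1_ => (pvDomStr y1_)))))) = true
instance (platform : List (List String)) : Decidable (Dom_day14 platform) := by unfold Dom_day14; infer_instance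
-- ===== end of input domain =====

-- B replaces A's per-rock rolling simulation by a per-segment arithmetic-sum formula (alternative decomposition, same cost class).

-- ===== PORT A =====
-- one row of A's inner loop: roll the cell at `column`, updating (blocked, result)
def stepA (lrow c : Int) (st : List Int × Int) (rl : Int × List String) : List Int × Int :=
  let block := PySem.List.pyGetD rl.2 c ""
  let blocked := if block = "#" then PySem.List.pySetD st.1 c (rl.1 + 1) else st.1
  if block = "O" then
    (PySem.List.pySetD blocked c (PySem.List.pyGetD blocked c 0 + 1),
     st.2 + lrow - PySem.List.pyGetD blocked c 0)
  else (blocked, st.2)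

-- A's inner loop: `for row, line in enumerate(platform): …` for one column c
def colA (platform : List (List String)) (lrow : Int) (st : List Int × Int) (c : Int) :
    List Int × Int :=
  (PySem.List.enumerate platform 0).foldl (stepA lrow c) st

def day14 (platform : List (List String)) : Int :=
  let blocked : List Int := (platform.headD []).map (fun _ => 0)
  let lrow : Int := (platform.length : Int)
  ((PySem.List.enumerate blocked 0).foldl
      (fun st cv => colA platform lrow st cv.1) (blocked, 0)).2

-- ===== PORT B =====
-- total north load of a packed run of `count` rocks starting at row `start`
def segLoad (lrow start count : Int) : Int :=
  count * lrow - (count * start + PySem.Int.floordiv (count * (count - 1)) 2)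

-- one row of B's inner loop, state (start, count, result)
def stepB (lrow c : Int) (st : Int × Int × Int) (rl : Int × List String) : Int × Int × Int :=
  let cell := PySem.List.pyGetD rl.2 c ""
  if cell = "#" then (rl.1 + 1, 0, st.2.2 + segLoad lrow st.1 st.2.1)
  else if cell = "O" then (st.1, st.2.1 + 1, st.2.2)
  else st

def colB (platform : List (List String)) (lrow : Int) (result c : Int) : Int :=
  let st := (PySem.List.enumerate platform 0).foldl (stepB lrow c) (0, 0, result)
  st.2.2 + segLoad lrow st.1 st.2.1

def day14_alt (platform : List (List String)) : Int :=
  let lrow : Int := (platform.length : Int)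
  let width : Int := ((platform.headD []).length : Int)
  (PySem.List.pyRange 0 width 1).foldl (colB platform lrow) 0

-- ===== PRECONDITION & SPEC =====
-- Pre_ excludes exactly the inputs on which Python A raises IndexError: the empty
-- platform (platform[0]) and ragged platforms with a row shorter than row 0.
def Pre_day14 (platform : List (List String)) : Prop :=
  platform ≠ [] ∧ ∀ line ∈ platform, (platform.headD []).length ≤ line.length
instance (platform : List (List String)) : Decidable (Pre_day14 platform) := by
  unfold Pre_day14; infer_instance

def pvWitness_day14 : List (List String) :=
  [["O", ".", "#"], ["O", "O", "."], [".", "#", "O"]]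

def Spec_day14 (platform : List (List String)) (out : Int) : Prop := out = day14_alt platform
instance (platform : List (List String)) (out : Int) : Decidable (Spec_day14 platform out) := by
  unfold Spec_day14; infer_instance

-- ===== CLAIM (what is proved, stated in full; the proofs are below) =====
def Claim_equal_day14 : Prop := ∀ (platform : List (List String)), Dom_day14 platform → Pre_day14 platform → Spec_day14 platform (day14 platform)

-- ===== LEMMAS AND PROOFS =====

theorem segLoad_zero (lrow start : Int) : segLoad lrow start 0 = 0 := by
  simp [segLoad]

theorem segLoad_succ (lrow start count : Int) :
    segLoad lrow start (count + 1) = segLoad lrow start count + lrow - start - count := by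
  obtain ⟨m, hm⟩ := Int.even_mul_succ_self (count - 1)
  have h1 : count * (count - 1) = 2 * m := by ring_nf; ring_nf at hm; linarith
  have h2 : (count + 1) * (count + 1 - 1) = 2 * (m + count) := by ring_nf; ring_nf at hm; linarith
  have f1 : PySem.Int.floordiv (count * (count - 1)) 2 = m := by
    rw [h1, PySem.Int.floordiv_eq_ediv_of_pos (by norm_num)]
    exact Int.mul_ediv_cancel_left m (by norm_num)
  have f2 : PySem.Int.floordiv ((count + 1) * (count + 1 - 1)) 2 = m + count := by
    rw [h2, PySem.Int.floordiv_eq_ediv_of_pos (by norm_num)]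
    exact Int.mul_ediv_cancel_left _ (by norm_num)
  simp only [segLoad, f1, f2]
  ring

-- fetching with default 0 from a list of zeros is 0, at any index
theorem pyGetD_all_zero (xs : List Int) (j : Int) (h : ∀ x ∈ xs, x = 0) :
    PySem.List.pyGetD xs j 0 = 0 := by
  have key : ∀ k : Nat, (xs[k]?).getD 0 = 0 := by
    intro k
    cases hx : xs[k]? with
    | none => simp
    | some v => simp [h v (List.mem_of_getElem? hx)]
  unfold PySem.List.pyGetD PySem.List.pyGet? PySem.List.pyIdx?
  split_ifs <;> simp [key]

-- a nonnegative-index fetch with default 0 is getElem?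
theorem pyGetD_nonneg (xs : List Int) (j : Int) (hj : 0 ≤ j) :
    PySem.List.pyGetD xs j 0 = (xs[j.toNat]?).getD 0 := by
  unfold PySem.List.pyGetD PySem.List.pyGet? PySem.List.pyIdx?
  split_ifs with h1
  · simp
  · have : xs.length ≤ j.toNat := by omega
    simp [List.getElem?_eq_none this]

-- per-column coupling invariant between A's and B's inner loops
theorem col_inv (lrow c : Int) (hc0 : 0 ≤ c) :
    ∀ (rows : List (List String)) (s : Int) (blocked : List Int)
      (resA start count resB : Int),
      c < (blocked.length : Int) →
      PySem.List.pyGetD blocked c 0 = start + count →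
      resA = resB + segLoad lrow start count →
      (∀ j : Int, 0 ≤ j → j ≠ c →
        PySem.List.pyGetD ((PySem.List.enumerate rows s).foldl (stepA lrow c) (blocked, resA)).1 j 0
          = PySem.List.pyGetD blocked j 0) ∧
      ((PySem.List.enumerate rows s).foldl (stepA lrow c) (blocked, resA)).1.length = blocked.length ∧
      PySem.List.pyGetD ((PySem.List.enumerate rows s).foldl (stepA lrow c) (blocked, resA)).1 c 0
        = ((PySem.List.enumerate rows s).foldl (stepB lrow c) (start, count, resB)).1
          + ((PySem.List.enumerate rows s).foldl (stepB lrow c) (start, count, resB)).2.1 ∧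
      ((PySem.List.enumerate rows s).foldl (stepA lrow c) (blocked, resA)).2
        = ((PySem.List.enumerate rows s).foldl (stepB lrow c) (start, count, resB)).2.2
          + segLoad lrow ((PySem.List.enumerate rows s).foldl (stepB lrow c) (start, count, resB)).1
              ((PySem.List.enumerate rows s).foldl (stepB lrow c) (start, count, resB)).2.1 := by
  intro rows
  induction rows with
  | nil =>
    intro s blocked resA start count resB hlen hbc hres
    simp [PySem.List.enumerate_nil, hbc, hres]
  | cons row rows ih =>
    intro s blocked resA start count resB hlen hbc hres
    have hclen : c.toNat < blocked.length := by omega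
    have hset : ∀ v : Int, PySem.List.pySetD blocked c v = blocked.set c.toNat v :=
      fun v => PySem.List.pySetD_of_nonneg blocked v hc0
    have hget_self : ∀ v : Int, PySem.List.pyGetD (blocked.set c.toNat v) c 0 = v := by
      intro v
      rw [pyGetD_nonneg _ _ hc0]
      simp [hclen]
    have hget_ne : ∀ (v j : Int), 0 ≤ j → j ≠ c →
        PySem.List.pyGetD (blocked.set c.toNat v) j 0 = PySem.List.pyGetD blocked j 0 := by
      intro v j hj hne
      rw [pyGetD_nonneg _ _ hj, pyGetD_nonneg _ _ hj,
        List.getElem?_set_ne (by omega)]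
    have eHO : (("#" : String) = "O") = False := by decide
    have eOH : (("O" : String) = "#") = False := by decide
    rw [PySem.List.enumerate_cons]
    by_cases hH : PySem.List.pyGetD row c "" = "#"
    · simp only [List.foldl_cons, stepA, stepB, hH, eHO, if_true, if_false,
        hset]
      have := ih (s + 1) (blocked.set c.toNat (s + 1)) resA (s + 1) 0
        (resB + segLoad lrow start count)
        (by simpa using hlen) (by simpa using hget_self (s + 1))
        (by rw [segLoad_zero]; omega)
      refine ⟨fun j hj hne => ?_, ?_, this.2.2.1, this.2.2.2⟩
      · rw [this.1 j hj hne, hget_ne _ j hj hne]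
      · rw [this.2.1]; simp
    · by_cases hO : PySem.List.pyGetD row c "" = "O"
      · simp only [List.foldl_cons, stepA, stepB, hO, eOH, if_true, if_false,
          hset, hbc]
        have := ih (s + 1) (blocked.set c.toNat (start + count + 1))
          (resA + lrow - (start + count)) start (count + 1) resB
          (by simpa using hlen)
          (by rw [hget_self]; ring)
          (by rw [segLoad_succ]; omega)
        refine ⟨fun j hj hne => ?_, ?_, this.2.2.1, this.2.2.2⟩
        · rw [this.1 j hj hne, hget_ne _ j hj hne]
        · rw [this.2.1]; simp
      · simp only [List.foldl_cons, stepA, stepB, if_neg hH, if_neg hO]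
        exact ih (s + 1) blocked resA start count resB hlen hbc hres

-- outer loop: fold over a duplicate-free list of in-range zero columns
theorem outer_inv (platform : List (List String)) (lrow : Int) :
    ∀ (cs : List Int) (blocked : List Int) (resA resB : Int),
      cs.Nodup →
      (∀ c ∈ cs, 0 ≤ c ∧ c < (blocked.length : Int) ∧ PySem.List.pyGetD blocked c 0 = 0) →
      resA = resB →
      (cs.foldl (colA platform lrow) (blocked, resA)).2 = cs.foldl (colB platform lrow) resB := by
  intro cs
  induction cs with
  | nil => intro blocked resA resB _ _ h; simpa using h
  | cons c cs ih =>
    intro blocked resA resB hnd hcs hres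
    obtain ⟨hc0, hclen, hc0val⟩ := hcs c (by simp)
    have key := col_inv lrow c hc0 platform 0 blocked resA 0 0 resB hclen
      (by rw [hc0val, add_zero]) (by rw [segLoad_zero]; omega)
    have Hcond : ∀ c' ∈ cs, 0 ≤ c' ∧
        c' < ((colA platform lrow (blocked, resA) c).1.length : Int) ∧
        PySem.List.pyGetD (colA platform lrow (blocked, resA) c).1 c' 0 = 0 := by
      intro c' hc'
      obtain ⟨h0', hlen', hval'⟩ := hcs c' (by simp [hc'])
      have hne : c' ≠ c := by
        rintro rfl; exact (List.nodup_cons.mp hnd).1 hc'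
      refine ⟨h0', ?_, ?_⟩
      · have := key.2.1
        simp only [colA] at *
        omega
      · have := key.1 c' h0' hne
        simp only [colA] at *
        rw [this]; exact hval'
    have Hres2 : (colA platform lrow (blocked, resA) c).2 = colB platform lrow resB c := by
      simp only [colA, colB]
      exact key.2.2.2
    have hrec := ih (colA platform lrow (blocked, resA) c).1
      (colA platform lrow (blocked, resA) c).2 (colB platform lrow resB c)
      (List.Nodup.of_cons hnd) Hcond Hres2
    simp only [List.foldl_cons]
    simpa only [Prod.mk.eta] using hrec

theorem day14_eq (platform : List (List String)) : day14 platform = day14_alt platform := by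
  simp only [day14, day14_alt]
  rw [← List.foldl_map, PySem.List.map_fst_enumerate]
  have hall : ∀ x ∈ (platform.headD []).map (fun _ => (0 : Int)), x = 0 := by
    intro x hx
    obtain ⟨_, _, rfl⟩ := List.mem_map.mp hx
    rfl
  have := outer_inv platform (platform.length : Int)
    (PySem.List.pyRange 0 (((platform.headD []).map (fun _ => (0 : Int))).length : Int) 1)
    ((platform.headD []).map (fun _ => (0 : Int))) 0 0
    (PySem.List.nodup_pyRange_one _ _)
    (fun c hc => by
      obtain ⟨h0, h1⟩ := (PySem.List.mem_pyRange_one).mp hc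
      exact ⟨h0, h1, pyGetD_all_zero _ _ hall⟩)
    rfl
  simpa using this

-- ===== VERDICT (by name: the statement is the Claim_ definition above) =====
theorem day14_spec : Claim_equal_day14 := by
  intro platform _ _
  unfold Spec_day14
  exact day14_eq platform
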